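-- pv_equiv track=rewrite | github.com/Ackrome/FU | Course_1/egeprog/8.2 ege.py | sem
-- ===== SOURCE A (Python) =====
-- def sem(i):
--     m = []
--     for n in range(9999,i):
--         s = ''
--         while n > 0:
--             s = str(n % 7) + s
--             n = n // 7
--         if s.count('5') == 1:
--            h=[s.count('50') == 0, s.count('52') == 0, s.count('54') == 0, s.count('56') == 0, s.count('05') == 0,s.count('25') == 0, s.count('45') == 0, s.count('65') == 0]
--            if all(h) == True:
--                 m.append(1)
--     return sum(m)
-- ===== SOURCE B (Python) =====
-- def sem(i):
--     # Same count, but purely arithmetic: walk the base-7 digits of each n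
--     # low-to-high, checking the 5-adjacency rule on digit pairs and counting
--     # fives on the fly -- no string is ever built.
--     def ok(n):
--         fives = 1 if n % 7 == 5 else 0
--         while n >= 7:
--             lo = n % 7
--             n = n // 7
--             hi = n % 7
--             if (hi == 5 and lo % 2 == 0) or (lo == 5 and hi % 2 == 0):
--                 return False
--             if hi == 5:
--                 fives += 1
--         return fives == 1
--
--     total = 0
--     for n in range(9999, i):
--         if ok(n):
--             total += 1
--     return total
-- ===== Notes on version B (the rewrite author's own statement) =====
-- stated objective: faster
-- what changed: Per number, B replaces A's base-seven string construction plus nine substring-count scans by a single arithmetic walk over the base-seven digits that checks the digit-five adjacency rule on consecutive digit pairs and counts digit-five occurrences on the fly.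
import Mathlib
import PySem

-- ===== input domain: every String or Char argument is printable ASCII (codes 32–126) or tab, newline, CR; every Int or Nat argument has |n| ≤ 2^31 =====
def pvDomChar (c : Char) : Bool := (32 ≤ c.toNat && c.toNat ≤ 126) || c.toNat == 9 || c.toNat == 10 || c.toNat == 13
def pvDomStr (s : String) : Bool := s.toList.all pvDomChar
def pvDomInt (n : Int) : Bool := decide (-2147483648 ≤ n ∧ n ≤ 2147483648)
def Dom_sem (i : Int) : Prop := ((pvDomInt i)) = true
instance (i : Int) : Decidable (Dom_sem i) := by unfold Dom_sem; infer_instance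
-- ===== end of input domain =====

-- B replaces A's per-number base-seven string building and substring scans by a purely
-- arithmetic low-to-high digit walk (measured constant-factor faster; same counting loop over the range).

-- ===== PORT A =====
-- the Python str is represented as List Char (PySem.Chars convention)
def semBuild (n : Int) (s : List Char) : List Char :=
  if _h : 0 < n then
    semBuild (PySem.Int.floordiv n 7) (PySem.Int.toChars (PySem.Int.mod n 7) ++ s)
  else s
termination_by n.toNat
decreasing_by
  simp only [PySem.Int.floordiv]
  rw [Int.fdiv_eq_ediv]
  simp only [show ((0:Int) ≤ 7 ∨ (7:Int) ∣ n) from Or.inl (by norm_num), if_pos]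
  omega

def sem (i : Int) : Int :=
  ((PySem.List.pyRange 9999 i 1).foldl (fun m n =>
      let s := semBuild n []
      if PySem.Chars.count s ['5'] == 1 then
        let h := [PySem.Chars.count s ['5','0'] == 0, PySem.Chars.count s ['5','2'] == 0,
                  PySem.Chars.count s ['5','4'] == 0, PySem.Chars.count s ['5','6'] == 0,
                  PySem.Chars.count s ['0','5'] == 0, PySem.Chars.count s ['2','5'] == 0,
                  PySem.Chars.count s ['4','5'] == 0, PySem.Chars.count s ['6','5'] == 0]
        if h.all (fun b => b) then m ++ [(1:Int)] else m
      else m) ([] : List Int)).sum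

-- ===== PORT B =====
def okLoop (n : Int) (fives : Int) : Bool :=
  if h : 7 ≤ n then
    let lo := PySem.Int.mod n 7
    let n' := PySem.Int.floordiv n 7
    let hi := PySem.Int.mod n' 7
    if (hi == 5 && PySem.Int.mod lo 2 == 0) || (lo == 5 && PySem.Int.mod hi 2 == 0) then
      false
    else
      okLoop n' (if hi == 5 then fives + 1 else fives)
  else fives == 1
termination_by n.toNat
decreasing_by
  simp only [PySem.Int.floordiv]
  rw [Int.fdiv_eq_ediv]
  simp only [show ((0:Int) ≤ 7 ∨ (7:Int) ∣ n) from Or.inl (by norm_num), if_pos]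
  omega

def semOk (n : Int) : Bool :=
  okLoop n (if PySem.Int.mod n 7 == 5 then 1 else 0)

def sem_alt (i : Int) : Int :=
  (PySem.List.pyRange 9999 i 1).foldl
    (fun total n => if semOk n then total + 1 else total) 0

-- ===== PRECONDITION & SPEC =====
def Spec_sem (i : Int) (out : Int) : Prop := out = sem_alt i
instance (i : Int) (out : Int) : Decidable (Spec_sem i out) := by unfold Spec_sem; infer_instance

-- ===== CLAIM (what is proved, stated in full; the proofs are below) =====
def Claim_equal_sem : Prop := ∀ (i : Int), Dom_sem i → Spec_sem i (sem i)

-- ===== LEMMAS AND PROOFS =====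

-- base-7 digits of a natural number, least significant first
def dig7 (m : Nat) : List Nat :=
  if h : m = 0 then [] else m % 7 :: dig7 (m / 7)
termination_by m
decreasing_by exact Nat.div_lt_self (Nat.pos_of_ne_zero h) (by norm_num)

def chr (d : Nat) : Char := Char.ofNat (48 + d)

-- the adjacency rule on a pair of base-7 digits (lo = less significant)
abbrev good (lo hi : Nat) : Prop :=
  ¬ ((hi = 5 ∧ lo % 2 = 0) ∨ (lo = 5 ∧ hi % 2 = 0))

-- the adjacency rule read off the string (a before b in the string)
abbrev goodc (a b : Char) : Prop :=
  ¬ ([a,b] = ['5','0'] ∨ [a,b] = ['5','2'] ∨ [a,b] = ['5','4'] ∨ [a,b] = ['5','6'] ∨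
     [a,b] = ['0','5'] ∨ [a,b] = ['2','5'] ∨ [a,b] = ['4','5'] ∨ [a,b] = ['6','5'])

lemma dig7_zero : dig7 0 = [] := by unfold dig7; simp

lemma dig7_pos {m : Nat} (h : m ≠ 0) : dig7 m = m % 7 :: dig7 (m / 7) := by
  conv_lhs => unfold dig7
  simp [h]

lemma dig7_lt : ∀ (m : Nat), ∀ x ∈ dig7 m, x < 7 := by
  intro m
  induction m using Nat.strong_induction_on with
  | _ m ih =>
    by_cases h : m = 0
    · subst h; unfold dig7; simp
    · rw [dig7_pos h]
      intro x hx
      rcases List.mem_cons.mp hx with h1 | h1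
      · subst h1; exact Nat.mod_lt _ (by norm_num)
      · exact ih (m / 7) (Nat.div_lt_self (Nat.pos_of_ne_zero h) (by norm_num)) x h1

lemma fmod7 (m : Nat) : PySem.Int.mod (m : Int) 7 = ((m % 7 : Nat) : Int) := by
  simp [PySem.Int.mod, Int.fmod_eq_emod]

lemma fdiv7 (m : Nat) : PySem.Int.floordiv (m : Int) 7 = ((m / 7 : Nat) : Int) := by
  simp [PySem.Int.floordiv, Int.fdiv_eq_ediv]

lemma fmod2 (m : Nat) : PySem.Int.mod (m : Int) 2 = ((m % 2 : Nat) : Int) := by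
  simp [PySem.Int.mod, Int.fmod_eq_emod]

-- count.go facts
lemma go_le (sub : List Char) : ∀ (fuel : Nat) (l : List Char) (acc : Nat),
    acc ≤ PySem.Chars.count.go sub fuel l acc := by
  intro fuel
  induction fuel with
  | zero => intro l acc; simp [PySem.Chars.count.go]
  | succ f ih =>
    intro l acc
    cases l with
    | nil => simp [PySem.Chars.count.go]
    | cons h t =>
      rw [PySem.Chars.count.go]
      split
      · exact le_trans (Nat.le_succ acc) (ih _ _)
      · exact ih _ _

lemma go_eq_zero_iff (sub : List Char) (hs : sub ≠ []) :
    ∀ (fuel : Nat) (l : List Char) (acc : Nat), l.length ≤ fuel →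
    (PySem.Chars.count.go sub fuel l acc = acc ↔ ¬ sub <:+: l) := by
  intro fuel
  induction fuel with
  | zero =>
    intro l acc hl
    have : l = [] := List.eq_nil_of_length_eq_zero (Nat.le_zero.mp hl)
    subst this
    simp [PySem.Chars.count.go, List.infix_nil, hs]
  | succ f ih =>
    intro l acc hl
    cases l with
    | nil => simp [PySem.Chars.count.go, List.infix_nil, hs]
    | cons h t =>
      rw [PySem.Chars.count.go]
      split
      · rename_i hpre
        have hp : sub <+: (h :: t) := List.isPrefixOf_iff_prefix.mp hpre
        constructor
        · intro heq
          have := go_le sub f (List.drop sub.length (h :: t)) (acc + 1)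
          omega
        · intro hni
          exact absurd hp.isInfix hni
      · rename_i hpre
        have hnp : ¬ sub <+: (h :: t) := fun hp => hpre (List.isPrefixOf_iff_prefix.mpr hp)
        rw [ih t acc (by simp at hl ⊢; omega)]
        rw [List.infix_cons_iff]
        tauto

lemma count_eq_zero_iff (s sub : List Char) (hs : sub ≠ []) :
    PySem.Chars.count s sub = 0 ↔ ¬ sub <:+: s := by
  unfold PySem.Chars.count
  simp [List.isEmpty_iff, hs]
  exact go_eq_zero_iff sub hs s.length s 0 le_rfl

lemma go_single (c : Char) : ∀ (fuel : Nat) (l : List Char) (acc : Nat), l.length ≤ fuel →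
    PySem.Chars.count.go [c] fuel l acc = acc + l.count c := by
  intro fuel
  induction fuel with
  | zero =>
    intro l acc hl
    have : l = [] := List.eq_nil_of_length_eq_zero (Nat.le_zero.mp hl)
    subst this
    simp [PySem.Chars.count.go]
  | succ f ih =>
    intro l acc hl
    cases l with
    | nil => simp [PySem.Chars.count.go]
    | cons h t =>
      rw [PySem.Chars.count.go]
      have hlt : t.length ≤ f := by simp at hl; omega
      split
      · rename_i hpre
        have hp : [c] <+: (h :: t) := List.isPrefixOf_iff_prefix.mp hpre
        have hc : c = h := (List.cons_prefix_cons.mp hp).1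
        subst hc
        simp only [List.length_cons, List.length_nil, Nat.zero_add, List.drop_succ_cons,
          List.drop_zero]
        rw [ih t (acc+1) hlt]
        simp
        ring
      · rename_i hpre
        have hne : ¬ h = c := by
          intro he; subst he
          exact hpre (List.isPrefixOf_iff_prefix.mpr ⟨t, by simp⟩)
        rw [ih t acc hlt]
        simp [List.count_cons]
        exact hne

lemma count_single (s : List Char) (c : Char) : PySem.Chars.count s [c] = s.count c := by
  unfold PySem.Chars.count
  simp
  simpa using go_single c s.length s 0 le_rfl

-- chains vs pair infixes
lemma isChain_iff_pairs {α : Type} (P : α → α → Prop) :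
    ∀ (l : List α), List.IsChain P l ↔ ∀ a b, [a,b] <:+: l → P a b := by
  intro l
  induction l with
  | nil => simp [List.infix_nil]
  | cons x t ih =>
    cases t with
    | nil =>
      simp only [List.isChain_singleton, true_iff]
      intro a b hinf
      have := hinf.length_le
      simp at this
    | cons y t2 =>
      rw [List.isChain_cons_cons, ih]
      constructor
      · intro ⟨hxy, hrest⟩ a b hinf
        rcases List.infix_cons_iff.mp hinf with hp | hp
        · rcases List.cons_prefix_cons.mp hp with ⟨rfl, hp2⟩
          rcases List.cons_prefix_cons.mp hp2 with ⟨rfl, _⟩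
          exact hxy
        · exact hrest a b hp
      · intro h
        exact ⟨h x y ⟨[], t2, by simp⟩,
          fun a b hinf => h a b (List.infix_cons_iff.mpr (Or.inr hinf))⟩

-- A's string is the base-7 digits, most significant first
lemma semBuild_eq (m : Nat) (s : List Char) :
    semBuild (m : Int) s = (dig7 m).reverse.map chr ++ s := by
  induction m using Nat.strong_induction_on generalizing s with
  | _ m ih =>
    by_cases h : m = 0
    · subst h
      rw [semBuild, dig7_zero]
      simp
    · rw [semBuild]
      have hpos : (0:Int) < (m:Int) := by exact_mod_cast Nat.pos_of_ne_zero h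
      rw [dif_pos hpos, fmod7, fdiv7]
      have hd : PySem.Int.toChars ((m % 7 : Nat) : Int) = [chr (m % 7)] := by
        have h7 : m % 7 < 7 := Nat.mod_lt _ (by norm_num)
        unfold chr
        interval_cases hm : (m % 7) <;> decide
      rw [hd, ih (m / 7) (Nat.div_lt_self (Nat.pos_of_ne_zero h) (by norm_num))]
      rw [dig7_pos h]
      simp

lemma count_map7 (l : List Nat) (h : ∀ x ∈ l, x < 7) :
    (l.map chr).count '5' = l.count 5 := by
  induction l with
  | nil => simp
  | cons a t ih =>
    simp only [List.map_cons, List.count_cons]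
    rw [ih (fun x hx => h x (List.mem_cons_of_mem _ hx))]
    have ha : a < 7 := h a (List.mem_cons_self ..)
    congr 1
    have hb : (chr a == '5') = (a == 5) := by
      unfold chr; interval_cases a <;> decide
    simp [hb]

lemma goodc_chr {x y : Nat} (hx : x < 7) (hy : y < 7) : goodc (chr x) (chr y) ↔ good y x := by
  unfold goodc good chr
  interval_cases x <;> interval_cases y <;> simp

-- B's loop computes the chain condition and the number of fives
lemma okLoop_eq (m : Nat) (f : Int) :
    okLoop (m : Int) f =
      (decide (List.IsChain good (dig7 m)) &&
       decide (f + (((dig7 m).tail.count 5 : Nat) : Int) = 1)) := by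
  induction m using Nat.strong_induction_on generalizing f with
  | _ m ih =>
    by_cases h7 : 7 ≤ m
    · have h7i : (7:Int) ≤ (m:Int) := by exact_mod_cast h7
      have hm0 : m ≠ 0 := by omega
      have hq0 : m / 7 ≠ 0 := by
        intro hq; rw [Nat.div_eq_zero_iff] at hq; omega
      rw [okLoop, dif_pos h7i]
      simp only [fmod7, fdiv7, fmod2]
      have hcond : ((((m / 7 % 7 : Nat) : Int) == 5) && (((m % 7 % 2 : Nat) : Int) == 0) ||
          (((m % 7 : Nat) : Int) == 5) && (((m / 7 % 7 % 2 : Nat) : Int) == 0)) =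
          !decide (good (m % 7) (m / 7 % 7)) := by
        rw [Bool.eq_iff_iff]
        simp only [Bool.or_eq_true, Bool.and_eq_true, beq_iff_eq, Bool.not_eq_true',
          decide_eq_false_iff_not, good, not_not]
        push_cast
        omega
      rw [hcond]
      by_cases hg : good (m % 7) (m / 7 % 7)
      · rw [decide_eq_true hg]
        rw [if_neg (by simp)]
        rw [ih (m / 7) (Nat.div_lt_self (Nat.pos_of_ne_zero hm0) (by norm_num))]
        have hchain : List.IsChain good (dig7 (m / 7)) ↔ List.IsChain good (dig7 m) := by
          rw [dig7_pos hm0, dig7_pos hq0, List.isChain_cons_cons, ← dig7_pos hq0]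
          exact (and_iff_right hg).symm
        rw [decide_eq_decide.mpr hchain]
        congr 1
        rw [decide_eq_decide]
        rw [dig7_pos hm0, List.tail_cons, dig7_pos hq0, List.count_cons, List.tail_cons]
        have hb : ((((m / 7 % 7 : Nat) : Int)) == 5) = decide (m / 7 % 7 = 5) := by
          rw [Bool.eq_iff_iff]; simp; omega
        rw [hb]
        by_cases h5 : m / 7 % 7 = 5
        · simp [h5]
          omega
        · simp [h5]
      · rw [decide_eq_false hg]
        rw [if_pos (by simp)]
        have hchain : ¬ List.IsChain good (dig7 m) := by
          rw [dig7_pos hm0, dig7_pos hq0, List.isChain_cons_cons]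
          rw [← dig7_pos hq0]
          exact fun hc => hg hc.1
        rw [decide_eq_false hchain]
        simp
    · have h7i : ¬ (7:Int) ≤ (m:Int) := by exact_mod_cast h7
      rw [okLoop, dif_neg h7i]
      have hch : List.IsChain good (dig7 m) := by
        by_cases h : m = 0
        · subst h; rw [dig7_zero]; exact List.IsChain.nil
        · rw [dig7_pos h]
          have hz : m / 7 = 0 := Nat.div_eq_of_lt (by omega)
          rw [hz, dig7_zero]
          exact List.isChain_singleton ..
      have htail : (dig7 m).tail = [] := by
        by_cases h : m = 0
        · subst h; rw [dig7_zero]; rfl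
        · rw [dig7_pos h]
          have hz : m / 7 = 0 := Nat.div_eq_of_lt (by omega)
          rw [hz, dig7_zero]
          rfl
      rw [decide_eq_true hch, htail]
      simp
      rw [Bool.eq_iff_iff]
      simp

lemma semOk_eq (m : Nat) :
    semOk (m : Int) = decide (List.IsChain good (dig7 m) ∧ (dig7 m).count 5 = 1) := by
  unfold semOk
  rw [fmod7, okLoop_eq]
  rw [Bool.eq_iff_iff]
  simp only [Bool.and_eq_true, decide_eq_true_eq]
  constructor
  · intro ⟨h1, h2⟩
    refine ⟨h1, ?_⟩
    by_cases h : m = 0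
    · subst h
      rw [dig7_zero] at *
      simp at h2
    · rw [dig7_pos h]
      rw [dig7_pos h] at h2
      simp only [List.tail_cons] at h2
      rw [List.count_cons]
      split at h2 <;> rename_i hb <;> simp only [beq_iff_eq] at hb ⊢
      · have : m % 7 = 5 := by exact_mod_cast hb
        simp [this]
        omega
      · have : ¬ m % 7 = 5 := by
          intro hx; exact hb (by exact_mod_cast hx)
        simp [this]
        omega
  · intro ⟨h1, h2⟩
    refine ⟨h1, ?_⟩
    by_cases h : m = 0
    · subst h
      rw [dig7_zero] at h2
      simp at h2
    · rw [dig7_pos h] at h2 ⊢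
      simp only [List.tail_cons]
      rw [List.count_cons] at h2
      by_cases h5 : m % 7 = 5
      · rw [if_pos (show (((m % 7 : Nat) : Int) == 5) = true by simp [h5])]
        simp [h5] at h2
        omega
      · rw [if_neg (by
          simp only [beq_iff_eq]
          intro hx
          exact h5 (by exact_mod_cast hx))]
        simp [h5] at h2
        omega

-- pairwise substring count = 0
lemma count_pair_eq_zero_iff (s : List Char) (a b : Char) :
    PySem.Chars.count s [a,b] = 0 ↔ ¬ [a,b] <:+: s := by
  exact count_eq_zero_iff s [a,b] (by simp)

-- A's per-number test, as a predicate
def predA (n : Int) : Bool :=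
  (PySem.Chars.count (semBuild n []) ['5'] == 1) &&
  ([PySem.Chars.count (semBuild n []) ['5','0'] == 0, PySem.Chars.count (semBuild n []) ['5','2'] == 0,
    PySem.Chars.count (semBuild n []) ['5','4'] == 0, PySem.Chars.count (semBuild n []) ['5','6'] == 0,
    PySem.Chars.count (semBuild n []) ['0','5'] == 0, PySem.Chars.count (semBuild n []) ['2','5'] == 0,
    PySem.Chars.count (semBuild n []) ['4','5'] == 0, PySem.Chars.count (semBuild n []) ['6','5'] == 0].all
    (fun b => b))

lemma predA_eq (m : Nat) : predA (m : Int) = semOk (m : Int) := by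
  unfold predA
  have hs : semBuild (m : Int) [] = (dig7 m).reverse.map chr := by
    simpa using semBuild_eq m []
  have h7r : ∀ x ∈ (dig7 m).reverse, x < 7 := by
    intro x hx
    exact dig7_lt m x (List.mem_reverse.mp hx)
  rw [semOk_eq, hs]
  rw [count_single, count_map7 _ h7r, List.count_reverse]
  have hchain : List.IsChain goodc ((dig7 m).reverse.map chr) ↔ List.IsChain good (dig7 m) := by
    rw [List.isChain_map, List.isChain_reverse, isChain_iff_pairs, isChain_iff_pairs]
    constructor
    · intro H a b hinf
      have ha : a < 7 := dig7_lt m a ((List.IsInfix.mem (by simp) hinf))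
      have hb : b < 7 := dig7_lt m b ((List.IsInfix.mem (by simp) hinf))
      exact (goodc_chr hb ha).mp (H a b hinf)
    · intro H a b hinf
      have ha : a < 7 := dig7_lt m a ((List.IsInfix.mem (by simp) hinf))
      have hb : b < 7 := dig7_lt m b ((List.IsInfix.mem (by simp) hinf))
      exact (goodc_chr hb ha).mpr (H a b hinf)
  rw [Bool.eq_iff_iff]
  simp only [Bool.and_eq_true, beq_iff_eq, List.all_cons, List.all_nil, Bool.and_eq_true,
    decide_eq_true_eq, count_pair_eq_zero_iff]
  rw [and_comm]
  apply and_congr_left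
  intro _
  rw [← hchain, isChain_iff_pairs]
  set t : List Char := (dig7 m).reverse.map chr with ht
  constructor
  · intro ⟨h1, h2, h3, h4, h5, h6, h7, h8, _⟩ a b hinf hbad
    rcases hbad with e | e | e | e | e | e | e | e
    · exact h1 (e ▸ hinf)
    · exact h2 (e ▸ hinf)
    · exact h3 (e ▸ hinf)
    · exact h4 (e ▸ hinf)
    · exact h5 (e ▸ hinf)
    · exact h6 (e ▸ hinf)
    · exact h7 (e ▸ hinf)
    · exact h8 (e ▸ hinf)
  · intro H
    exact ⟨fun h => (H _ _ h) (Or.inl rfl),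
           fun h => (H _ _ h) (Or.inr (Or.inl rfl)),
           fun h => (H _ _ h) (Or.inr (Or.inr (Or.inl rfl))),
           fun h => (H _ _ h) (Or.inr (Or.inr (Or.inr (Or.inl rfl)))),
           fun h => (H _ _ h) (Or.inr (Or.inr (Or.inr (Or.inr (Or.inl rfl))))),
           fun h => (H _ _ h) (Or.inr (Or.inr (Or.inr (Or.inr (Or.inr (Or.inl rfl)))))),
           fun h => (H _ _ h) (Or.inr (Or.inr (Or.inr (Or.inr (Or.inr (Or.inr (Or.inl rfl))))))),
           ⟨fun h => (H _ _ h) (Or.inr (Or.inr (Or.inr (Or.inr (Or.inr (Or.inr (Or.inr rfl))))))), trivial⟩⟩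

lemma sem_body_eq (acc : List Int) (n : Int) :
    (let s := semBuild n []
     if PySem.Chars.count s ['5'] == 1 then
       let h := [PySem.Chars.count s ['5','0'] == 0, PySem.Chars.count s ['5','2'] == 0,
                 PySem.Chars.count s ['5','4'] == 0, PySem.Chars.count s ['5','6'] == 0,
                 PySem.Chars.count s ['0','5'] == 0, PySem.Chars.count s ['2','5'] == 0,
                 PySem.Chars.count s ['4','5'] == 0, PySem.Chars.count s ['6','5'] == 0]
       if h.all (fun b => b) then acc ++ [(1:Int)] else acc
     else acc) = if predA n then acc ++ [(1:Int)] else acc := by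
  unfold predA
  by_cases h1 : PySem.Chars.count (semBuild n []) ['5'] == 1 <;>
    by_cases h2 : ([PySem.Chars.count (semBuild n []) ['5','0'] == 0,
      PySem.Chars.count (semBuild n []) ['5','2'] == 0,
      PySem.Chars.count (semBuild n []) ['5','4'] == 0,
      PySem.Chars.count (semBuild n []) ['5','6'] == 0,
      PySem.Chars.count (semBuild n []) ['0','5'] == 0,
      PySem.Chars.count (semBuild n []) ['2','5'] == 0,
      PySem.Chars.count (semBuild n []) ['4','5'] == 0,
      PySem.Chars.count (semBuild n []) ['6','5'] == 0].all (fun b => b)) <;>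
    simp [h1, h2]

-- ===== VERDICT (by name: the statement is the Claim_ definition above) =====
theorem sem_spec : Claim_equal_sem := by
  intro i _
  show sem i = sem_alt i
  unfold sem sem_alt
  have hA : ∀ (acc : List Int) (n : Int),
      (fun (m : List Int) (n : Int) =>
        let s := semBuild n []
        if PySem.Chars.count s ['5'] == 1 then
          let h := [PySem.Chars.count s ['5','0'] == 0, PySem.Chars.count s ['5','2'] == 0,
                    PySem.Chars.count s ['5','4'] == 0, PySem.Chars.count s ['5','6'] == 0,
                    PySem.Chars.count s ['0','5'] == 0, PySem.Chars.count s ['2','5'] == 0,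
                    PySem.Chars.count s ['4','5'] == 0, PySem.Chars.count s ['6','5'] == 0]
          if h.all (fun b => b) then m ++ [(1:Int)] else m
        else m) acc n = if predA n then acc ++ [(1:Int)] else acc := by
    intro acc n
    exact sem_body_eq acc n
  rw [show (fun (m : List Int) (n : Int) =>
        let s := semBuild n []
        if PySem.Chars.count s ['5'] == 1 then
          let h := [PySem.Chars.count s ['5','0'] == 0, PySem.Chars.count s ['5','2'] == 0,
                    PySem.Chars.count s ['5','4'] == 0, PySem.Chars.count s ['5','6'] == 0,
                    PySem.Chars.count s ['0','5'] == 0, PySem.Chars.count s ['2','5'] == 0,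
                    PySem.Chars.count s ['4','5'] == 0, PySem.Chars.count s ['6','5'] == 0]
          if h.all (fun b => b) then m ++ [(1:Int)] else m
        else m) = (fun (m : List Int) (n : Int) => if predA n then m ++ [(1:Int)] else m) from
    funext fun acc => funext fun n => hA acc n]
  rw [PySem.List.foldl_append_if predA (fun _ => (1:Int)) (PySem.List.pyRange 9999 i 1) []]
  rw [PySem.List.foldl_if_add_one semOk (PySem.List.pyRange 9999 i 1) 0]
  rw [List.nil_append]
  rw [PySem.List.sum_map_const_int]
  rw [← List.countP_eq_length_filter]
  rw [List.countP_congr (fun n hn => by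
    have h9 : (9999:Int) ≤ n := (PySem.List.mem_pyRange_one.mp hn).1
    obtain ⟨m, rfl⟩ : ∃ m : Nat, (m : Int) = n := ⟨n.toNat, Int.toNat_of_nonneg (by omega)⟩
    rw [predA_eq m])]
  ring
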